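-- pv_equiv track=rewrite | github.com/ZeinabTaghavi/FanAvaran | Optimization_forward.py | Boxing
-- ===== SOURCE A (Python) =====
-- def Boxing(box_number, box_size, object_volume_array, base_index):
--     a_index = base_index
--     object_counter = 0
--     for b_n in range(box_number):  # filling each box
--         total_objects_volume = 0
--         while total_objects_volume <= box_size and a_index < len(object_volume_array):
--             # until box is full or no object left in array
--             total_objects_volume += object_volume_array[a_index]
--             a_index += 1
--             object_counter += 1
--         if total_objects_volume > box_size:  # in case counter counts one extra object
--             a_index -= 1
--             object_counter -= 1
--     return a_index, object_counter  # returns index of last object in boxes and numbers of objects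
-- ===== SOURCE B (Python) =====
-- def Boxing(box_number, box_size, object_volume_array, base_index):
--     # Two-stage: (1) one pass over the array computing every greedy box
--     # boundary once, independent of box_number; (2) pick the boundary by
--     # index.  The object counter is just the distance travelled from
--     # base_index, so no counter is maintained at all.
--     if box_number <= 0 or box_size < 0:
--         return base_index, 0
--     n = len(object_volume_array)
--     bps = [base_index]
--     i = base_index
--     while i < n:
--         total = 0
--         j = i
--         while j < n and total + object_volume_array[j] <= box_size:
--             total += object_volume_array[j]
--             j += 1
--         if j == i:
--             break  # this object overflows an empty box: every later box stalls
--         bps.append(j)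
--         i = j
--     pos = bps[max(0, min(box_number, len(bps) - 1))]
--     return pos, pos - base_index
-- ===== Notes on version B (the rewrite author's own statement) =====
-- stated objective: faster
-- what changed: Replaces A's interleaved per-box nested loops and dual counters by two stages: one pass over the array precomputes every greedy box boundary (independent of box_number), then the answer is a single index into that boundary list, with the object counter recovered as pos - base_index instead of being maintained.
-- intended difference: When box_number >= 1 and box_size < 0, A's back-off fires on every empty box and returns (base_index - box_number, -box_number), a negative object count; B fills no objects and returns (base_index, 0), the intended value since nothing fits in a negative-capacity box. — e.g. on Boxing(3, -2, [1, 2], 0): A returns (-3, -3), B returns (0, 0)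
import Mathlib
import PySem

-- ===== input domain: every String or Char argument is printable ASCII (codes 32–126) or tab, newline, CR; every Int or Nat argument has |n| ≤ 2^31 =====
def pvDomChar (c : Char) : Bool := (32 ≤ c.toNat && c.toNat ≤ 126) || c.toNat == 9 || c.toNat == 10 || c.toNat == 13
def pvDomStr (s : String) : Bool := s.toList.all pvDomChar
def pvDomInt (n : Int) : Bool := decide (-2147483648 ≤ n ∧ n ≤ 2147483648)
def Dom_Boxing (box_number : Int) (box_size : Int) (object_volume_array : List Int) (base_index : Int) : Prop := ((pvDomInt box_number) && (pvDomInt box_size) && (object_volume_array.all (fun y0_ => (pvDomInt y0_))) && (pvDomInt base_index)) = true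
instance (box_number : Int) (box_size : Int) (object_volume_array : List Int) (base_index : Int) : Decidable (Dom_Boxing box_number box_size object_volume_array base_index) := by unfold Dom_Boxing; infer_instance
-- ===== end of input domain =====

-- B precomputes all greedy box boundaries in one array pass and indexes into them
-- (counter = pos - base_index), instead of A's per-box nested loops; on box_size < 0 with
-- box_number ≥ 1 A returns negative counters while B returns (base_index, 0) — see D_Boxing.


-- ===== PORT A =====
-- inner while loop: while total <= box_size and a_index < len(arr): total += arr[a_index]; a_index += 1; counter += 1
-- (fuel bounds the iterations: a_index strictly increases and the loop stops at len, so len - a_index suffices)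
def innerA (size : Int) (arr : List Int) : Nat → Int → Int → Int → Int × Int × Int
  | 0, t, i, c => (t, i, c)
  | fuel + 1, t, i, c =>
    if t ≤ size ∧ i < (arr.length : Int) then
      innerA size arr fuel (t + PySem.List.pyGetD arr i 0) (i + 1) (c + 1)
    else (t, i, c)

-- one iteration of the outer for-loop body (one box, with the back-off correction)
def boxA (size : Int) (arr : List Int) (s : Int × Int) : Int × Int :=
  let r := innerA size arr (((arr.length : Int) - s.1).toNat) 0 s.1 s.2
  if r.1 > size then (r.2.1 - 1, r.2.2 - 1) else (r.2.1, r.2.2)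

-- for b_n in range(box_number): iterated box_number.toNat times
def outerA (size : Int) (arr : List Int) : Nat → Int × Int → Int × Int
  | 0, s => s
  | b + 1, s => outerA size arr b (boxA size arr s)

def Boxing (box_number : Int) (box_size : Int) (object_volume_array : List Int) (base_index : Int) : Int × Int :=
  outerA box_size object_volume_array box_number.toNat (base_index, 0)

-- ===== PORT B =====
-- inner while loop of stage 1: while j < n and total + arr[j] <= box_size: …  (fuel as above)
def scanB (size : Int) (arr : List Int) : Nat → Int → Int → Int
  | 0, j, _ => j
  | fuel + 1, j, t =>
    if j < (arr.length : Int) ∧ t + PySem.List.pyGetD arr j 0 ≤ size then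
      scanB size arr fuel (j + 1) (t + PySem.List.pyGetD arr j 0)
    else j

-- stage 1: the outer while loop appending each box boundary to bps (fuel bounds the
-- iterations: i strictly increases and the loop stops at i = len, so (len - i)+ suffices)
def bpsB (size : Int) (arr : List Int) : Nat → Int → List Int → List Int
  | 0, _, acc => acc
  | fuel + 1, i, acc =>
    if i < (arr.length : Int) then
      if scanB size arr (((arr.length : Int) - i).toNat) i 0 = i then acc
      else bpsB size arr fuel (scanB size arr (((arr.length : Int) - i).toNat) i 0)
        (acc ++ [scanB size arr (((arr.length : Int) - i).toNat) i 0])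
    else acc

def Boxing_alt (box_number : Int) (box_size : Int) (object_volume_array : List Int) (base_index : Int) : Int × Int :=
  if box_number ≤ 0 ∨ box_size < 0 then (base_index, 0)
  else
    let bps := bpsB box_size object_volume_array (((object_volume_array.length : Int) - base_index).toNat) base_index [base_index]
    let pos := PySem.List.pyGetD bps (max 0 (min box_number ((bps.length : Int) - 1))) 0
    (pos, pos - base_index)

-- ===== PRECONDITION & SPEC =====
-- Pre_ excludes exactly the inputs on which A raises IndexError: a first read at an index
-- below -len(arr) (box_number ≥ 1 and box_size ≥ 0 force that read).
def Pre_Boxing (box_number : Int) (box_size : Int) (object_volume_array : List Int) (base_index : Int) : Prop :=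
  ¬ (1 ≤ box_number ∧ 0 ≤ box_size ∧ base_index < -(object_volume_array.length : Int))
instance (box_number : Int) (box_size : Int) (object_volume_array : List Int) (base_index : Int) : Decidable (Pre_Boxing box_number box_size object_volume_array base_index) := by unfold Pre_Boxing; infer_instance
def pvWitness_Boxing : Int × Int × List Int × Int := (2, 5, [3, 2, 4], 0)

-- When box_number ≥ 1 and box_size < 0, A's back-off fires on every empty box and returns
-- (base_index - box_number, -box_number), a negative object count; B fills no objects and
-- returns (base_index, 0), the intended value since nothing fits in a negative-capacity box.
def D_Boxing (box_number : Int) (box_size : Int) (object_volume_array : List Int) (base_index : Int) : Prop :=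
  1 ≤ box_number ∧ box_size < 0
instance (box_number : Int) (box_size : Int) (object_volume_array : List Int) (base_index : Int) : Decidable (D_Boxing box_number box_size object_volume_array base_index) := by unfold D_Boxing; infer_instance

def Spec_Boxing (box_number : Int) (box_size : Int) (object_volume_array : List Int) (base_index : Int) (out : Int × Int) : Prop := ¬ D_Boxing box_number box_size object_volume_array base_index → out = Boxing_alt box_number box_size object_volume_array base_index
instance (box_number : Int) (box_size : Int) (object_volume_array : List Int) (base_index : Int) (out : Int × Int) : Decidable (Spec_Boxing box_number box_size object_volume_array base_index out) := by unfold Spec_Boxing; infer_instance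

def pvDiffWitness_Boxing : Int × Int × List Int × Int := (3, -2, [1, 2], 0)
def pvDiffWitnessOut_Boxing : (Int × Int) × (Int × Int) := ((-3, -3), (0, 0))

-- ===== CLAIM (what is proved, stated in full; the proofs are below) =====
def Claim_unchanged_Boxing : Prop := ∀ (box_number : Int) (box_size : Int) (object_volume_array : List Int) (base_index : Int), Dom_Boxing box_number box_size object_volume_array base_index → Pre_Boxing box_number box_size object_volume_array base_index → Spec_Boxing box_number box_size object_volume_array base_index (Boxing box_number box_size object_volume_array base_index)
def Claim_changed_Boxing : Prop := Dom_Boxing (pvDiffWitness_Boxing.1) (pvDiffWitness_Boxing.2.1) (pvDiffWitness_Boxing.2.2.1) (pvDiffWitness_Boxing.2.2.2) ∧ Pre_Boxing (pvDiffWitness_Boxing.1) (pvDiffWitness_Boxing.2.1) (pvDiffWitness_Boxing.2.2.1) (pvDiffWitness_Boxing.2.2.2) ∧ D_Boxing (pvDiffWitness_Boxing.1) (pvDiffWitness_Boxing.2.1) (pvDiffWitness_Boxing.2.2.1) (pvDiffWitness_Boxing.2.2.2) ∧ Boxing (pvDiffWitness_Boxing.1) (pvDiffWitness_Boxing.2.1)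 (pvDiffWitness_Boxing.2.2.1) (pvDiffWitness_Boxing.2.2.2) = pvDiffWitnessOut_Boxing.1 ∧ Boxing_alt (pvDiffWitness_Boxing.1) (pvDiffWitness_Boxing.2.1) (pvDiffWitness_Boxing.2.2.1) (pvDiffWitness_Boxing.2.2.2) = pvDiffWitnessOut_Boxing.2 ∧ pvDiffWitnessOut_Boxing.1 ≠ pvDiffWitnessOut_Boxing.2
def Claim_exact_Boxing : Prop := ∀ (box_number : Int) (box_size : Int) (object_volume_array : List Int) (base_index : Int), Dom_Boxing box_number box_size object_volume_array base_index → Pre_Boxing box_number box_size object_volume_array base_index → D_Boxing box_number box_size object_volume_array base_index → Boxing box_number box_size object_volume_array base_index ≠ Boxing_alt box_number box_size object_volume_array base_index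

-- ===== LEMMAS AND PROOFS =====

-- out-of-range / fuel-zero exits of the two inner loops
theorem scanB_oob (size : Int) (arr : List Int) (i : Int) (hi : ¬ i < (arr.length : Int)) :
    ∀ (f : Nat) (t : Int), scanB size arr f i t = i := by
  intro f t
  cases f with
  | zero => rfl
  | succ f => rw [scanB, if_neg (by intro h; exact hi h.1)]

theorem innerA_oob (size : Int) (arr : List Int) (i : Int) (hi : ¬ i < (arr.length : Int)) :
    ∀ (f : Nat) (t c : Int), innerA size arr f t i c = (t, i, c) := by
  intro f t c
  cases f with
  | zero => rfl
  | succ f => rw [innerA, if_neg (by intro h; exact hi h.2)]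

theorem innerA_stop (size : Int) (arr : List Int) (t i c : Int) (ht : ¬ t ≤ size) :
    ∀ (f : Nat), innerA size arr f t i c = (t, i, c) := by
  intro f
  cases f with
  | zero => rfl
  | succ f => rw [innerA, if_neg (by intro h; exact ht h.1)]

-- one genuine step of each loop, at the canonical fuel (len - position)
theorem scanB_step (size : Int) (arr : List Int) (i t : Int) (hi : i < (arr.length : Int)) :
    scanB size arr (((arr.length : Int) - i).toNat) i t
      = if t + PySem.List.pyGetD arr i 0 ≤ size then
          scanB size arr (((arr.length : Int) - (i + 1)).toNat) (i + 1) (t + PySem.List.pyGetD arr i 0)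
        else i := by
  have hF : ((arr.length : Int) - i).toNat = ((arr.length : Int) - (i + 1)).toNat + 1 := by omega
  rw [hF, scanB]
  by_cases hv : t + PySem.List.pyGetD arr i 0 ≤ size
  · rw [if_pos ⟨hi, hv⟩, if_pos hv]
  · rw [if_neg (by intro h; exact hv h.2), if_neg hv]

theorem innerA_step (size : Int) (arr : List Int) (t i c : Int)
    (ht : t ≤ size) (hi : i < (arr.length : Int)) :
    innerA size arr (((arr.length : Int) - i).toNat) t i c
      = innerA size arr (((arr.length : Int) - (i + 1)).toNat)
          (t + PySem.List.pyGetD arr i 0) (i + 1) (c + 1) := by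
  have hF : ((arr.length : Int) - i).toNat = ((arr.length : Int) - (i + 1)).toNat + 1 := by omega
  rw [hF, innerA, if_pos ⟨ht, hi⟩]

-- scanB never moves left
theorem scanB_ge (size : Int) (arr : List Int) (f : Nat) :
    ∀ j t, j ≤ scanB size arr f j t := by
  induction f with
  | zero => intro j t; exact le_refl j
  | succ f ih =>
    intro j t
    rw [scanB]
    split
    · have := ih (j + 1) (t + PySem.List.pyGetD arr j 0)
      omega
    · omega

-- A with a negative box size walks backwards one step per box
theorem outerA_negsize (size : Int) (arr : List Int) (h : size < 0) :
    ∀ (b : Nat) (s : Int × Int), outerA size arr b s = (s.1 - b, s.2 - b) := by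
  intro b
  induction b with
  | zero => intro s; simp [outerA]
  | succ b ih =>
    intro s
    have hbox : boxA size arr s = (s.1 - 1, s.2 - 1) := by
      unfold boxA
      rw [innerA_stop size arr 0 s.1 s.2 (by omega)]
      simp
      omega
    show outerA size arr b (boxA size arr s) = _
    rw [hbox, ih]
    simp only [Prod.mk.injEq]
    push_cast
    omega

-- a state boxA fixes is fixed by any number of boxes
theorem outerA_fix (size : Int) (arr : List Int) (s : Int × Int)
    (h : boxA size arr s = s) : ∀ b : Nat, outerA size arr b s = s := by
  intro b
  induction b with
  | zero => rfl
  | succ b ih => show outerA size arr b (boxA size arr s) = s; rw [h, ih]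

-- mid-inner-box completion of A: finish the current box from state (t, i, c)
def finishA (size : Int) (arr : List Int) (t i c : Int) : Int × Int :=
  let r := innerA size arr (((arr.length : Int) - i).toNat) t i c
  if r.1 > size then (r.2.1 - 1, r.2.2 - 1) else (r.2.1, r.2.2)

-- A's one-box loop lands exactly where B's stage-1 scan lands, moving i and c in lockstep
theorem finishA_scan_aux (size : Int) (arr : List Int) (k : Nat) :
    ∀ t i c, ((arr.length : Int) - i).toNat ≤ k → t ≤ size →
      finishA size arr t i c
        = (scanB size arr (((arr.length : Int) - i).toNat) i t,
           c + (scanB size arr (((arr.length : Int) - i).toNat) i t - i)) := by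
  induction k with
  | zero =>
    intro t i c hk ht
    have hi : ¬ i < (arr.length : Int) := by omega
    have : finishA size arr t i c = (i, c) := by
      unfold finishA
      rw [innerA_oob size arr i hi]
      simp
      omega
    rw [this, scanB_oob size arr i hi]
    simp
  | succ k ih =>
    intro t i c hk ht
    by_cases hi : i < (arr.length : Int)
    · by_cases hv : t + PySem.List.pyGetD arr i 0 ≤ size
      · have hscan := scanB_step size arr i t hi
        rw [if_pos hv] at hscan
        have hinner : finishA size arr t i c
            = finishA size arr (t + PySem.List.pyGetD arr i 0) (i + 1) (c + 1) := by
          unfold finishA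
          rw [innerA_step size arr t i c ht hi]
        rw [hinner, ih _ _ _ (by omega) hv, hscan]
        simp only [Prod.mk.injEq]
        exact ⟨trivial, by omega⟩
      · have hscan := scanB_step size arr i t hi
        rw [if_neg hv] at hscan
        have : finishA size arr t i c = (i, c) := by
          unfold finishA
          rw [innerA_step size arr t i c ht hi,
            innerA_stop size arr _ _ _ (by omega)]
          simp
          omega
        rw [this, hscan]
        simp
    · have : finishA size arr t i c = (i, c) := by
        unfold finishA
        rw [innerA_oob size arr i hi]
        simp
        omega
      rw [this, scanB_oob size arr i hi]
      simp

theorem boxA_scan (size : Int) (arr : List Int) (hs : 0 ≤ size) (i c : Int) :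
    boxA size arr (i, c)
      = (scanB size arr (((arr.length : Int) - i).toNat) i 0,
         c + (scanB size arr (((arr.length : Int) - i).toNat) i 0 - i)) :=
  finishA_scan_aux size arr (((arr.length : Int) - i).toNat) 0 i c le_rfl hs

-- the chain of greedy box boundaries after i (proof-side view of stage 1's list)
def chainB (size : Int) (arr : List Int) (i : Int) : List Int :=
  if h : i < (arr.length : Int) then
    if hj : scanB size arr (((arr.length : Int) - i).toNat) i 0 = i then []
    else scanB size arr (((arr.length : Int) - i).toNat) i 0
      :: chainB size arr (scanB size arr (((arr.length : Int) - i).toNat) i 0)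
  else []
termination_by ((arr.length : Int) - i).toNat
decreasing_by have := scanB_ge size arr (((arr.length : Int) - i).toNat) i 0; omega

theorem bpsB_eq_aux (size : Int) (arr : List Int) (k : Nat) :
    ∀ i acc, ((arr.length : Int) - i).toNat ≤ k →
      bpsB size arr k i acc = acc ++ chainB size arr i := by
  induction k with
  | zero =>
    intro i acc hk
    have hi : ¬ i < (arr.length : Int) := by omega
    rw [chainB, dif_neg hi]
    simp [bpsB]
  | succ k ih =>
    intro i acc hk
    rw [chainB]
    show (if i < (arr.length : Int) then _ else acc) = _
    by_cases hi : i < (arr.length : Int)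
    · rw [if_pos hi, dif_pos hi]
      by_cases hj : scanB size arr (((arr.length : Int) - i).toNat) i 0 = i
      · rw [if_pos hj, dif_pos hj]; simp
      · have hgt := scanB_ge size arr (((arr.length : Int) - i).toNat) i 0
        rw [if_neg hj, dif_neg hj, ih _ _ (by omega)]
        simp
    · rw [if_neg hi, dif_neg hi]; simp

-- main simulation: b boxes from (i, c) land on the (min b L)-th boundary of the chain
theorem outerA_chain_aux (size : Int) (arr : List Int) (hs : 0 ≤ size) (k : Nat) :
    ∀ (i c : Int) (b : Nat), ((arr.length : Int) - i).toNat ≤ k →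
      outerA size arr b (i, c) =
        ((i :: chainB size arr i).getD (min b (chainB size arr i).length) 0,
         c + ((i :: chainB size arr i).getD (min b (chainB size arr i).length) 0 - i)) := by
  induction k with
  | zero =>
    intro i c b hk
    have hi : ¬ i < (arr.length : Int) := by omega
    rw [chainB, dif_neg hi]
    have hfix : boxA size arr (i, c) = (i, c) := by
      rw [boxA_scan size arr hs, scanB_oob size arr i hi]
      simp
    rw [outerA_fix size arr _ hfix b]
    simp
  | succ k ih =>
    intro i c b hk
    rw [chainB]
    by_cases hi : i < (arr.length : Int)
    · rw [dif_pos hi]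
      by_cases hj : scanB size arr (((arr.length : Int) - i).toNat) i 0 = i
      · rw [dif_pos hj]
        have hfix : boxA size arr (i, c) = (i, c) := by
          rw [boxA_scan size arr hs, hj]
          simp
        rw [outerA_fix size arr _ hfix b]
        simp
      · rw [dif_neg hj]
        cases b with
        | zero => simp [outerA]
        | succ b' =>
          have hgt := scanB_ge size arr (((arr.length : Int) - i).toNat) i 0
          show outerA size arr b' (boxA size arr (i, c)) = _
          rw [boxA_scan size arr hs]
          rw [ih (scanB size arr (((arr.length : Int) - i).toNat) i 0)
            (c + (scanB size arr (((arr.length : Int) - i).toNat) i 0 - i)) b' (by omega)]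
          simp only [List.length_cons]
          have hmin : min (b' + 1)
              ((chainB size arr (scanB size arr (((arr.length : Int) - i).toNat) i 0)).length + 1)
              = min b' (chainB size arr (scanB size arr (((arr.length : Int) - i).toNat) i 0)).length + 1 := by
            omega
          rw [hmin, List.getD_cons_succ]
          simp only [Prod.mk.injEq]
          exact ⟨trivial, by omega⟩
    · rw [dif_neg hi]
      have hfix : boxA size arr (i, c) = (i, c) := by
        rw [boxA_scan size arr hs, scanB_oob size arr i hi]
        simp
      rw [outerA_fix size arr _ hfix b]
      simp

theorem outerA_chain (size : Int) (arr : List Int) (hs : 0 ≤ size) (i c : Int) (b : Nat) :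
    outerA size arr b (i, c) =
      ((i :: chainB size arr i).getD (min b (chainB size arr i).length) 0,
       c + ((i :: chainB size arr i).getD (min b (chainB size arr i).length) 0 - i)) :=
  outerA_chain_aux size arr hs (((arr.length : Int) - i).toNat) i c b le_rfl

-- ===== VERDICT (by name: the statement is the Claim_ definition above) =====
theorem Boxing_spec : Claim_unchanged_Boxing := by
  intro bn size arr base _ _ hD
  unfold Boxing Boxing_alt
  by_cases hbn : bn ≤ 0
  · have h0 : bn.toNat = 0 := by omega
    rw [h0, if_pos (Or.inl hbn)]
    rfl
  · have hs : 0 ≤ size := by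
      by_contra h
      exact hD ⟨by omega, by omega⟩
    rw [if_neg (by omega)]
    rw [outerA_chain size arr hs base 0 bn.toNat]
    simp only [bpsB_eq_aux size arr (((arr.length : Int) - base).toNat) base [base] le_rfl,
      List.singleton_append, List.length_cons]
    set L := (chainB size arr base).length with hL
    have hmax : max 0 (min bn ((((L : Nat) + 1 : Nat) : Int) - 1)) = min bn (L : Int) := by
      push_cast
      omega
    rw [hmax]
    have hk : (min bn (L : Int)) = ((min bn.toNat L : Nat) : Int) := by
      push_cast
      omega
    rw [hk, PySem.List.pyGetD_natCast]
    simp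

theorem Boxing_changed : Claim_changed_Boxing := by
  unfold Claim_changed_Boxing
  refine ⟨by decide, by decide, by decide, ?_, ?_, by decide⟩
  · show Boxing 3 (-2) [1, 2] 0 = (-3, -3)
    unfold Boxing
    rw [outerA_negsize _ _ (by norm_num)]
    norm_num
  · show Boxing_alt 3 (-2) [1, 2] 0 = (0, 0)
    unfold Boxing_alt
    rw [if_pos (Or.inr (by norm_num))]

theorem Boxing_tight : Claim_exact_Boxing := by
  intro bn size arr base _ _ hD
  obtain ⟨h1, h2⟩ := hD
  unfold Boxing Boxing_alt
  rw [outerA_negsize size arr h2 bn.toNat (base, 0)]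
  rw [if_pos (Or.inr h2)]
  intro h
  have h3 := congrArg Prod.snd h
  simp at h3
  omega
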